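-- pv_equiv track=rewrite | github.com/datalad/metadata-model | tools/metadata_creator/create.py | _create_file_paths
-- ===== SOURCE A (Python) =====
-- from typing import Dict, List, Tuple, Union
--
-- def _create_file_paths(tree_spec: List[int], upper_levels: List[int]) -> List[str]:
--     upper_level_postfix = (
--         "." + ".".join(map(str, upper_levels))
--         if upper_levels
--         else ""
--     )
--     node_count = tree_spec[0]
--     if len(tree_spec) == 1:
--         return [
--             f"file{upper_level_postfix}.{node_number}"
--             for node_number in range(node_count)]
--
--     return [
--         f"dir{upper_level_postfix}.{node_index}/{sub_tree}"
--         for node_index in range(node_count)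
--         for sub_tree in _create_file_paths(tree_spec[1:], upper_levels + [node_index])
--     ]
-- ===== SOURCE B (Python) =====
-- def _create_file_paths(tree_spec, upper_levels):
--     # Iterative level-by-level expansion of a frontier of (path, index-list) pairs.
--     frontier = [("", list(upper_levels))]
--     last = len(tree_spec) - 1
--     for level, count in enumerate(tree_spec):
--         kind = "file" if level == last else "dir"
--         new_frontier = []
--         for path, idxs in frontier:
--             for i in range(count):
--                 new_idxs = idxs + [i]
--                 component = kind + "." + ".".join(map(str, new_idxs))
--                 new_frontier.append(
--                     (component if path == "" else path + "/" + component, new_idxs))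
--         frontier = new_frontier
--     return [path for path, _ in frontier]
-- ===== Notes on version B (the rewrite author's own statement) =====
-- stated objective: alternative
-- what changed: Replaces A's recursion over tree levels with an iterative breadth-first loop that expands a frontier of (path, index-list) pairs level by level; Pre_ excludes only the empty tree_spec, on which A raises IndexError.
import Mathlib
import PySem

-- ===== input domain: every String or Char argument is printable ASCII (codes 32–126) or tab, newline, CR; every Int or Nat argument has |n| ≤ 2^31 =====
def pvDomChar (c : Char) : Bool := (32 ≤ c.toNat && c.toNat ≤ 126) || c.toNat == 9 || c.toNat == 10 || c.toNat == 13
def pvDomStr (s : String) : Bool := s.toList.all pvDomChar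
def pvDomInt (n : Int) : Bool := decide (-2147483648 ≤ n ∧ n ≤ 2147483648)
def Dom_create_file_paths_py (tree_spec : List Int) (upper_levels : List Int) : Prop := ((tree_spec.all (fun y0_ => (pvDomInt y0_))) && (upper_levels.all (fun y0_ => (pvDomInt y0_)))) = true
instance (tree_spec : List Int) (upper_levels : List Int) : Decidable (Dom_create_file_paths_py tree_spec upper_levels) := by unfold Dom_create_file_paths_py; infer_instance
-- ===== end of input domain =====

-- B replaces A's recursion with an iterative level-by-level expansion of a frontier of
-- (path, index-list) pairs (different decomposition, same cost); equivalence proved for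
-- nonempty tree_spec (A raises IndexError on an empty spec).


-- ===== PORT A =====
-- A-side helper: the '"." + ".".join(map(str, upper_levels)) if upper_levels else ""' expression
def upperPostfix (upper_levels : List Int) : String :=
  if upper_levels = [] then "" else "." ++ PySem.Str.join "." (upper_levels.map PySem.Int.toStr)

def create_file_paths_py (tree_spec : List Int) (upper_levels : List Int) : List String :=
  match tree_spec with
  | [] => []   -- Python raises IndexError at tree_spec[0]; excluded by Pre_
  | node_count :: rest =>
    if rest = [] then
      (PySem.List.pyRange 0 node_count 1).map
        (fun node_number => "file" ++ upperPostfix upper_levels ++ "." ++ PySem.Int.toStr node_number)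
    else
      (PySem.List.pyRange 0 node_count 1).flatMap
        (fun node_index =>
          (create_file_paths_py rest (upper_levels ++ [node_index])).map
            (fun sub_tree =>
              "dir" ++ upperPostfix upper_levels ++ "." ++ PySem.Int.toStr node_index ++ "/" ++ sub_tree))

-- ===== PORT B =====
-- B-side helper: the inner double loop body over one frontier entry
def altExpand (kind : String) (count : Int) (pi : String × List Int) : List (String × List Int) :=
  (PySem.List.pyRange 0 count 1).map (fun i =>
    let new_idxs := pi.2 ++ [i]
    let component := kind ++ "." ++ PySem.Str.join "." (new_idxs.map PySem.Int.toStr)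
    (if pi.1 = "" then component else pi.1 ++ "/" ++ component, new_idxs))

def create_file_paths_py_alt (tree_spec : List Int) (upper_levels : List Int) : List String :=
  let last : Int := (tree_spec.length : Int) - 1
  ((PySem.List.enumerate tree_spec 0).foldl
      (fun frontier lc =>
        frontier.flatMap (altExpand (if lc.1 = last then "file" else "dir") lc.2))
      [("", upper_levels)]).map Prod.fst

-- ===== PRECONDITION & SPEC =====
-- Pre_ excludes only tree_spec = [], on which the Python A raises IndexError (tree_spec[0]).
def Pre_create_file_paths_py (tree_spec : List Int) (upper_levels : List Int) : Prop :=
  tree_spec ≠ []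
instance (tree_spec : List Int) (upper_levels : List Int) : Decidable (Pre_create_file_paths_py tree_spec upper_levels) := by unfold Pre_create_file_paths_py; infer_instance
def pvWitness_create_file_paths_py : List Int × List Int := ([2, 1], [0])

def Spec_create_file_paths_py (tree_spec : List Int) (upper_levels : List Int) (out : List String) : Prop := out = create_file_paths_py_alt tree_spec upper_levels
instance (tree_spec : List Int) (upper_levels : List Int) (out : List String) : Decidable (Spec_create_file_paths_py tree_spec upper_levels out) := by unfold Spec_create_file_paths_py; infer_instance

-- ===== CLAIM (what is proved, stated in full; the proofs are below) =====
def Claim_equal_create_file_paths_py : Prop := ∀ (tree_spec : List Int) (upper_levels : List Int), Dom_create_file_paths_py tree_spec upper_levels → Pre_create_file_paths_py tree_spec upper_levels → Spec_create_file_paths_py tree_spec upper_levels (create_file_paths_py tree_spec upper_levels)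

-- ===== LEMMAS AND PROOFS =====

-- proof-side reformulation of B's loop as head recursion on the remaining levels
def altLoop : List Int → List (String × List Int) → List (String × List Int)
  | [], frontier => frontier
  | count :: remaining, frontier =>
      altLoop remaining
        (frontier.flatMap (altExpand (if remaining = [] then "file" else "dir") count))

-- B's enumerate/foldl loop computes altLoop: the running index equals n-1 exactly on the last level
theorem foldl_enum_eq_altLoop (n : Int) :
    ∀ (l : List Int) (s : Int) (F : List (String × List Int)), s + l.length = n →
      (PySem.List.enumerate l s).foldl
          (fun frontier lc =>
            frontier.flatMap (altExpand (if lc.1 = n - 1 then "file" else "dir") lc.2)) F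
        = altLoop l F := by
  intro l
  induction l with
  | nil => intro s F _; simp [PySem.List.enumerate, altLoop]
  | cons c rest ih =>
    intro s F hs
    rw [show PySem.List.enumerate (c :: rest) s = (s, c) :: PySem.List.enumerate rest (s + 1) from rfl]
    rw [List.foldl_cons, ih (s + 1) _ (by simp at hs ⊢; omega)]
    have hcond : (s = n - 1) ↔ (rest = []) := by
      constructor
      · intro h
        have : (rest.length : Int) = 0 := by simp at hs; omega
        simpa using List.length_eq_zero_iff.mp (by exact_mod_cast this)
      · intro h; subst h; simp at hs; omega
    by_cases hr : rest = []
    · rw [altLoop, if_pos hr, if_pos (hcond.mpr hr)]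
    · rw [altLoop, if_neg hr, if_neg (fun h => hr (hcond.mp h))]

-- joining one more piece onto a nonempty join
theorem chars_join_snoc (sep x : List Char) :
    ∀ l : List (List Char), l ≠ [] →
      PySem.Chars.join sep (l ++ [x]) = PySem.Chars.join sep l ++ sep ++ x := by
  intro l
  induction l with
  | nil => intro h; exact absurd rfl h
  | cons p rest ih =>
    intro _
    cases rest with
    | nil => simp [PySem.Chars.join_cons_cons, PySem.Chars.join_singleton]
    | cons q r =>
      have := ih (by simp)
      simp only [List.cons_append] at this ⊢
      rw [PySem.Chars.join_cons_cons, this, PySem.Chars.join_cons_cons]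
      simp [List.append_assoc]

theorem str_join_snoc (l : List Int) (i : Int) (h : l ≠ []) :
    PySem.Str.join "." ((l ++ [i]).map PySem.Int.toStr)
      = PySem.Str.join "." (l.map PySem.Int.toStr) ++ "." ++ PySem.Int.toStr i := by
  apply String.toList_inj.mp
  simp only [PySem.Str.toList_join, String.toList_append, List.map_append, List.map_cons,
    List.map_nil]
  exact chars_join_snoc _ _ _ (by simpa using h)

theorem str_join_single (s : String) :
    PySem.Str.join "." [s] = s := by
  apply String.toList_inj.mp
  simp [PySem.Str.toList_join, PySem.Chars.join_singleton]

-- B's component string equals A's component string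
theorem comp_eq (k : String) (idxs : List Int) (i : Int) :
    k ++ "." ++ PySem.Str.join "." ((idxs ++ [i]).map PySem.Int.toStr)
      = k ++ upperPostfix idxs ++ "." ++ PySem.Int.toStr i := by
  by_cases h : idxs = []
  · subst h
    simp [upperPostfix, str_join_single]
  · rw [str_join_snoc _ _ h]
    simp only [upperPostfix, if_neg h, String.append_assoc]

theorem append_ne_empty (a b : String) (h : a.toList ≠ []) : a ++ b ≠ "" := by
  intro he
  have := congrArg String.toList he
  simp only [String.toList_append] at this
  exact h (List.append_eq_nil_iff.mp this).1

theorem comp_ne_empty (k : String) (hk : k.toList ≠ []) (s : String) : k ++ "." ++ s ≠ "" := by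
  have : k ++ "." ++ s = k ++ ("." ++ s) := by rw [String.append_assoc]
  rw [this]
  exact append_ne_empty _ _ hk

-- the loop invariant: running B's loop over a nonempty remaining spec appends A's results
theorem altLoop_inv :
    ∀ (s : List Int) (F : List (String × List Int)), s ≠ [] →
      (altLoop s F).map Prod.fst
        = F.flatMap (fun pi => (create_file_paths_py s pi.2).map
            (fun sub => if pi.1 = "" then sub else pi.1 ++ "/" ++ sub)) := by
  intro s
  induction s with
  | nil => intro F h; exact absurd rfl h
  | cons c rest ih =>
    intro F _
    by_cases hr : rest = []
    · subst hr
      simp only [altLoop, List.map_flatMap]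
      apply List.flatMap_congr
      intro pi _
      simp only [altExpand, create_file_paths_py, List.map_map, reduceIte]
      apply List.map_congr_left
      intro i _
      simp only [Function.comp]
      rw [comp_eq "file" pi.2 i]
    · rw [altLoop, if_neg hr, ih _ hr, List.flatMap_assoc]
      apply List.flatMap_congr
      intro pi _
      simp only [altExpand, List.flatMap_map, create_file_paths_py, if_neg hr,
        List.map_flatMap]
      apply List.flatMap_congr
      intro i _
      simp only [List.map_map]
      apply List.map_congr_left
      intro sub _
      simp only [Function.comp]
      rw [comp_eq "dir" pi.2 i]
      have hdc : ("dir" ++ upperPostfix pi.2 ++ "." ++ PySem.Int.toStr i) ≠ "" := by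
        apply comp_ne_empty ("dir" ++ upperPostfix pi.2)
        simp only [String.toList_append]
        have hd : ("dir" : String).toList = ['d','i','r'] := by decide
        simp [hd]
      by_cases hp : pi.1 = ""
      · rw [if_pos hp, if_neg hdc, if_pos hp]
      · have hpath : pi.1 ++ "/" ++ ("dir" ++ upperPostfix pi.2 ++ "." ++ PySem.Int.toStr i) ≠ "" := by
          apply append_ne_empty (pi.1 ++ "/")
          simp only [String.toList_append]
          have hs : ("/" : String).toList = ['/'] := by decide
          simp [hs]
        rw [if_neg hp, if_neg hpath, if_neg hp]
        simp only [String.append_assoc]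

-- ===== VERDICT (by name: the statement is the Claim_ definition above) =====
theorem create_file_paths_py_spec : Claim_equal_create_file_paths_py := by
  intro tree_spec upper_levels _ hpre
  unfold Spec_create_file_paths_py create_file_paths_py_alt
  have h := foldl_enum_eq_altLoop (tree_spec.length : Int) tree_spec 0
    [("", upper_levels)] (by simp)
  simp only [h]
  rw [altLoop_inv tree_spec [("", upper_levels)] hpre]
  simp
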